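-- pv_equiv track=rewrite | github.com/kuurroo/Nova | core/web_fetcher.py | _fastpath_urls
-- ===== SOURCE A (Python) =====
-- from typing import List, Tuple, Dict, Optional
--
-- _KNOWN_FAST = {
--     "nvidia linux driver": [
--         "https://www.nvidia.com/en-us/drivers/unix/",
--         "https://docs.nvidia.com/datacenter/tesla/tesla-release-notes-580-95-05/index.html",
--     ],
--     "python 3.13 release notes": [
--         "https://docs.python.org/3.13/whatsnew/changelog.html",
--         "https://docs.python.org/3.13/whatsnew/3.13.html",
--     ],
--     "cuda releases": [
--         "https://docs.nvidia.com/cuda/cuda-toolkit-release-notes/index.html",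
--     ],
-- }
--
-- def _fastpath_urls(q: str) -> List[str]:
--     x = (q or "").lower()
--     if "nvidia" in x and "linux" in x and ("driver" in x or "release" in x or "notes" in x):
--         return _KNOWN_FAST["nvidia linux driver"]
--     if "python" in x and "3.13" in x and ("release" in x or "notes" in x or "what's new" in x):
--         return _KNOWN_FAST["python 3.13 release notes"]
--     if "cuda" in x and any(w in x for w in ("release", "notes", "what's new", "changelog", "changed")):
--         return _KNOWN_FAST["cuda releases"]
--     return []
-- ===== SOURCE B (Python) =====
-- from typing import List
--
-- _KNOWN_FAST = {
--     "nvidia linux driver": [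
--         "https://www.nvidia.com/en-us/drivers/unix/",
--         "https://docs.nvidia.com/datacenter/tesla/tesla-release-notes-580-95-05/index.html",
--     ],
--     "python 3.13 release notes": [
--         "https://docs.python.org/3.13/whatsnew/changelog.html",
--         "https://docs.python.org/3.13/whatsnew/3.13.html",
--     ],
--     "cuda releases": [
--         "https://docs.nvidia.com/cuda/cuda-toolkit-release-notes/index.html",
--     ],
-- }
--
-- # All keywords any rule ever looks for, matched in ONE left-to-right scan of the query.
-- _KEYWORDS = ("nvidia", "linux", "driver", "release", "notes",
--              "python", "3.13", "what's new", "cuda", "changelog", "changed")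
--
-- # Ordered decision rules over the hit set: a rule fires when every group of
-- # alternatives has at least one keyword that was seen in the scan.
-- _RULES = [
--     ((("nvidia",), ("linux",), ("driver", "release", "notes")),
--      _KNOWN_FAST["nvidia linux driver"]),
--     ((("python",), ("3.13",), ("release", "notes", "what's new")),
--      _KNOWN_FAST["python 3.13 release notes"]),
--     ((("cuda",), ("release", "notes", "what's new", "changelog", "changed")),
--      _KNOWN_FAST["cuda releases"]),
-- ]
--
-- def _fastpath_urls(q: str) -> List[str]:
--     x = (q or "").lower()
--     # Single multi-pattern scan: walk the text once, recording every keyword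
--     # that starts at each position, instead of one substring search per test.
--     found = set()
--     for i in range(len(x) + 1):
--         for w in _KEYWORDS:
--             if x.startswith(w, i):
--                 found.add(w)
--     # Decide from the hit set alone; the text is no longer consulted.
--     for groups, urls in _RULES:
--         if all(any(w in found for w in g) for g in groups):
--             return urls
--     return []
-- ===== Notes on version B (the rewrite author's own statement) =====
-- stated objective: alternative
-- what changed: B replaces A's eleven independent substring searches inside three hard-coded if-branches by a single left-to-right multi-pattern scan of the query that collects the set of keywords occurring in it, followed by an ordered rules table decided purely from that hit set.
import Mathlib
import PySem

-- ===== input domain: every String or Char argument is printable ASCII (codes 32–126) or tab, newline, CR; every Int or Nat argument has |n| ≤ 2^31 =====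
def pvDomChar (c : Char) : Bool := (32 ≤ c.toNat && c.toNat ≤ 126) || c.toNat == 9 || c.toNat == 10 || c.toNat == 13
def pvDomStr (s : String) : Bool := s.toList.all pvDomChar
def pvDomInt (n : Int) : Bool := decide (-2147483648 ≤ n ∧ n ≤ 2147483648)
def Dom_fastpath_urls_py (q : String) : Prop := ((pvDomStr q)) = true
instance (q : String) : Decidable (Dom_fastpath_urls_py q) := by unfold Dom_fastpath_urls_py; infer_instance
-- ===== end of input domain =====

-- B replaces A's eleven independent substring searches in three if-branches by one
-- multi-pattern scan collecting the hit set of keywords, then a rules-table decision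
-- over that set (objective: alternative).

-- ===== PORT A =====
def knownNvidia : List String :=
  ["https://www.nvidia.com/en-us/drivers/unix/",
   "https://docs.nvidia.com/datacenter/tesla/tesla-release-notes-580-95-05/index.html"]
def knownPython : List String :=
  ["https://docs.python.org/3.13/whatsnew/changelog.html",
   "https://docs.python.org/3.13/whatsnew/3.13.html"]
def knownCuda : List String :=
  ["https://docs.nvidia.com/cuda/cuda-toolkit-release-notes/index.html"]

def fastpath_urls_py (q : String) : List String :=
  let x := PySem.Str.lower (if q == "" then "" else q)  -- (q or "").lower()
  if PySem.Str.isIn "nvidia" x && PySem.Str.isIn "linux" x &&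
     (PySem.Str.isIn "driver" x || PySem.Str.isIn "release" x || PySem.Str.isIn "notes" x) then
    knownNvidia
  else if PySem.Str.isIn "python" x && PySem.Str.isIn "3.13" x &&
     (PySem.Str.isIn "release" x || PySem.Str.isIn "notes" x || PySem.Str.isIn "what's new" x) then
    knownPython
  else if PySem.Str.isIn "cuda" x &&
     (["release", "notes", "what's new", "changelog", "changed"].any (fun w => PySem.Str.isIn w x)) then
    knownCuda
  else []

-- ===== PORT B =====
def altKeywords : List String :=
  ["nvidia", "linux", "driver", "release", "notes",
   "python", "3.13", "what's new", "cuda", "changelog", "changed"]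

def altRules : List (List (List String) × List String) :=
  [([["nvidia"], ["linux"], ["driver", "release", "notes"]], knownNvidia),
   ([["python"], ["3.13"], ["release", "notes", "what's new"]], knownPython),
   ([["cuda"], ["release", "notes", "what's new", "changelog", "changed"]], knownCuda)]

-- x.startswith(w, i): exact for 0 ≤ i (the only indices used).
def altStartsAt (xs : List Char) (w : String) (i : Nat) : Bool :=
  List.take w.toList.length (List.drop i xs) == w.toList

-- the 'for groups, urls in _RULES: if …: return urls' loop
def altLookup (rules : List (List (List String) × List String)) (found : PySem.Set String) : List String :=
  match rules with
  | [] => []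
  | (groups, urls) :: rest =>
      if groups.all (fun g => g.any (fun w => PySem.Set.contains found w)) then urls
      else altLookup rest found

def fastpath_urls_py_alt (q : String) : List String :=
  let x := PySem.Str.lower (if q == "" then "" else q)
  let xs := x.toList
  let found : PySem.Set String :=
    (PySem.List.pyRange 0 ((xs.length : Int) + 1) 1).foldl
      (fun s i => altKeywords.foldl
        (fun s w => if altStartsAt xs w i.toNat then PySem.Set.add s w else s) s)
      PySem.Set.empty
  altLookup altRules found

-- ===== PRECONDITION & SPEC =====
def Spec_fastpath_urls_py (q : String) (out : List String) : Prop := out = fastpath_urls_py_alt q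
instance (q : String) (out : List String) : Decidable (Spec_fastpath_urls_py q out) := by unfold Spec_fastpath_urls_py; infer_instance

-- ===== CLAIM (what is proved, stated in full; the proofs are below) =====
def Claim_equal_fastpath_urls_py : Prop := ∀ (q : String), Dom_fastpath_urls_py q → Spec_fastpath_urls_py q (fastpath_urls_py q)

-- ===== LEMMAS AND PROOFS =====

-- inner keyword fold: membership characterisation
theorem mem_inner_fold (xs : List Char) (i : Nat) (kws : List String) (s : PySem.Set String) (w : String) :
    w ∈ kws.foldl (fun s w' => if altStartsAt xs w' i then PySem.Set.add s w' else s) s ↔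
      w ∈ s ∨ (w ∈ kws ∧ altStartsAt xs w i = true) := by
  induction kws generalizing s with
  | nil => simp
  | cons k rest ih =>
      simp only [List.foldl_cons, ih]
      by_cases h : altStartsAt xs k i = true
      · simp [h, PySem.Set.mem_add]
        constructor
        · rintro ((hs | rfl) | ⟨hm, hw⟩)
          · exact Or.inl hs
          · exact Or.inr ⟨Or.inl rfl, h⟩
          · exact Or.inr ⟨Or.inr hm, hw⟩
        · rintro (hs | ⟨(rfl | hm), hw⟩)
          · exact Or.inl (Or.inl hs)
          · exact Or.inl (Or.inr rfl)
          · exact Or.inr ⟨hm, hw⟩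
      · simp only [h, Bool.false_eq_true, if_false]
        constructor
        · rintro (hs | ⟨hm, hw⟩)
          · exact Or.inl hs
          · exact Or.inr ⟨List.mem_cons_of_mem _ hm, hw⟩
        · rintro (hs | ⟨hm, hw⟩)
          · exact Or.inl hs
          · rcases List.mem_cons.mp hm with rfl | hm'
            · exact absurd hw h
            · exact Or.inr ⟨hm', hw⟩

-- outer position fold: membership characterisation
theorem mem_outer_fold (xs : List Char) (ps : List Int) (s : PySem.Set String) (w : String) :
    w ∈ ps.foldl (fun s i => altKeywords.foldl
        (fun s w' => if altStartsAt xs w' i.toNat then PySem.Set.add s w' else s) s) s ↔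
      w ∈ s ∨ ∃ i ∈ ps, w ∈ altKeywords ∧ altStartsAt xs w i.toNat = true := by
  induction ps generalizing s with
  | nil => simp
  | cons p rest ih =>
      simp only [List.foldl_cons, ih, mem_inner_fold]
      constructor
      · rintro ((hs | ⟨hm, hw⟩) | ⟨i, hi, hm, hw⟩)
        · exact Or.inl hs
        · exact Or.inr ⟨p, List.mem_cons_self, hm, hw⟩
        · exact Or.inr ⟨i, List.mem_cons_of_mem _ hi, hm, hw⟩
      · rintro (hs | ⟨i, hi, hm, hw⟩)
        · exact Or.inl (Or.inl hs)
        · rcases List.mem_cons.mp hi with rfl | hi'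
          · exact Or.inl (Or.inr ⟨hm, hw⟩)
          · exact Or.inr ⟨i, hi', hm, hw⟩

-- startswith at some scanned position ⟺ substring (for nonempty keywords)
theorem exists_startsAt_iff_isIn (xs : List Char) (w : String) (hw : w.toList ≠ []) :
    (∃ i ∈ PySem.List.pyRange 0 ((xs.length : Int) + 1) 1, altStartsAt xs w i.toNat = true) ↔
      PySem.Chars.isIn w.toList xs = true := by
  rw [← PySem.Chars.exists_prefix_drop_iff_isIn]
  constructor
  · rintro ⟨i, _, hst⟩
    exact ⟨i.toNat, List.prefix_iff_eq_take.mpr (beq_iff_eq.mp hst).symm⟩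
  · rintro ⟨j, hpre⟩
    refine ⟨(j : Int), ?_, ?_⟩
    · rw [PySem.List.mem_pyRange_one]
      constructor
      · exact Int.natCast_nonneg j
      · by_contra h
        push Not at h
        have hj : xs.length + 1 ≤ j := by exact_mod_cast h
        have : xs.drop j = [] := List.drop_eq_nil_of_le (by omega)
        rw [this] at hpre
        exact hw (List.prefix_nil.mp hpre)
    · unfold altStartsAt
      simp only [Int.toNat_natCast]
      exact beq_iff_eq.mpr (List.prefix_iff_eq_take.mp hpre).symm

theorem contains_found_eq (x : String) (w : String) (hw : w ∈ altKeywords) (hne : w.toList ≠ []) :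
    PySem.Set.contains
      ((PySem.List.pyRange 0 ((x.toList.length : Int) + 1) 1).foldl
        (fun s i => altKeywords.foldl
          (fun s w' => if altStartsAt x.toList w' i.toNat then PySem.Set.add s w' else s) s)
        PySem.Set.empty) w = PySem.Str.isIn w x := by
  rw [Bool.eq_iff_iff, PySem.Set.contains_iff, mem_outer_fold, PySem.Str.isIn_iff_infix,
      ← PySem.Chars.isIn_iff_infix, ← exists_startsAt_iff_isIn x.toList w hne]
  constructor
  · rintro (hs | ⟨i, hi, _, hst⟩)
    · exact absurd hs (List.not_mem_nil)
    · exact ⟨i, hi, hst⟩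
  · rintro ⟨i, hi, hst⟩
    exact Or.inr ⟨i, hi, hw, hst⟩

theorem fastpath_eq (q : String) : fastpath_urls_py q = fastpath_urls_py_alt q := by
  show _ =
    altLookup altRules
      ((PySem.List.pyRange 0 (((PySem.Str.lower (if q == "" then "" else q)).toList.length : Int) + 1) 1).foldl
        (fun s i => altKeywords.foldl
          (fun s w' => if altStartsAt (PySem.Str.lower (if q == "" then "" else q)).toList w' i.toNat
            then PySem.Set.add s w' else s) s)
        PySem.Set.empty)
  set x := PySem.Str.lower (if q == "" then "" else q) with hx
  set F := (PySem.List.pyRange 0 ((x.toList.length : Int) + 1) 1).foldl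
      (fun s i => altKeywords.foldl
        (fun s w' => if altStartsAt x.toList w' i.toNat then PySem.Set.add s w' else s) s)
      PySem.Set.empty with hF
  have key : ∀ w, w ∈ altKeywords → w.toList ≠ [] → PySem.Set.contains F w = PySem.Str.isIn w x := by
    rw [hF]; exact fun w hw hne => contains_found_eq x w hw hne
  have h0 := key "nvidia" (by simp [altKeywords]) (by decide)
  have h1 := key "linux" (by simp [altKeywords]) (by decide)
  have h2 := key "driver" (by simp [altKeywords]) (by decide)
  have h3 := key "release" (by simp [altKeywords]) (by decide)
  have h4 := key "notes" (by simp [altKeywords]) (by decide)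
  have h5 := key "python" (by simp [altKeywords]) (by decide)
  have h6 := key "3.13" (by simp [altKeywords]) (by decide)
  have h7 := key "what's new" (by simp [altKeywords]) (by decide)
  have h8 := key "cuda" (by simp [altKeywords]) (by decide)
  have h9 := key "changelog" (by simp [altKeywords]) (by decide)
  have h10 := key "changed" (by simp [altKeywords]) (by decide)
  show (if PySem.Str.isIn "nvidia" x && PySem.Str.isIn "linux" x &&
     (PySem.Str.isIn "driver" x || PySem.Str.isIn "release" x || PySem.Str.isIn "notes" x) then
    knownNvidia
  else if PySem.Str.isIn "python" x && PySem.Str.isIn "3.13" x &&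
     (PySem.Str.isIn "release" x || PySem.Str.isIn "notes" x || PySem.Str.isIn "what's new" x) then
    knownPython
  else if PySem.Str.isIn "cuda" x &&
     (["release", "notes", "what's new", "changelog", "changed"].any (fun w => PySem.Str.isIn w x)) then
    knownCuda
  else []) = altLookup altRules F
  simp only [altLookup, altRules, List.all_cons, List.all_nil, List.any_cons, List.any_nil,
    h0, h1, h2, h3, h4, h5, h6, h7, h8, h9, h10, Bool.and_true, Bool.or_false]
  simp only [Bool.and_assoc, Bool.or_assoc]

-- ===== VERDICT (by name: the statement is the Claim_ definition above) =====
theorem fastpath_urls_py_spec : Claim_equal_fastpath_urls_py := by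
  intro q _
  exact fastpath_eq q
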